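-- pv_equiv track=rewrite | github.com/AlphaCloudX/Word-Search-Script | Methods.py | methodFour
-- ===== SOURCE A (Python) =====
-- def stringify(diag):
--     text = ""
--     # Turning indices into 1 whole string
--     for y in range(len(diag)):
--         text = text + diag[y]
--
--     return text
--
-- def methodFour(array):
--     board = []
--     positions = []
--     # For Top Right to bottom Left | Right Half, Need to search left half | Remove First 2
--     for x in range(len(array[0]) + 1):
--         if x != 0:
--             diag = stringify([row[-(i + x)] for i, row in enumerate(array) if -(i + x) >= -(len(array[0]))])
--             board.append(diag)
--
--             position = [(i+1, -(i + x) + len(array[0])+1) for i, row in enumerate(array) if -(i + x) >= -(len(array[0]))]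
--             positions.append(position)
--
--     return board, positions
-- ===== SOURCE B (Python) =====
-- def methodFour(array):
--     # Single pass over rows into per-diagonal buckets instead of rescanning all rows for each diagonal.
--     w = len(array[0])
--     buckets = [[] for _ in range(w)]
--     for i, row in enumerate(array):
--         for x in range(1, w - i + 1):
--             buckets[x - 1].append((row[-(i + x)], (i + 1, w + 1 - i - x)))
--     board = ["".join(ch for ch, _ in b) for b in buckets]
--     positions = [[p for _, p in b] for b in buckets]
--     return board, positions
-- ===== Notes on version B (the rewrite author's own statement) =====
-- stated objective: alternative
-- what changed: B makes a single pass over the rows, distributing each cell into a per-diagonal bucket list, instead of A's rescan of every row once per diagonal x; the joined strings and positions are then read off the buckets in diagonal order.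
import Mathlib
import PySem

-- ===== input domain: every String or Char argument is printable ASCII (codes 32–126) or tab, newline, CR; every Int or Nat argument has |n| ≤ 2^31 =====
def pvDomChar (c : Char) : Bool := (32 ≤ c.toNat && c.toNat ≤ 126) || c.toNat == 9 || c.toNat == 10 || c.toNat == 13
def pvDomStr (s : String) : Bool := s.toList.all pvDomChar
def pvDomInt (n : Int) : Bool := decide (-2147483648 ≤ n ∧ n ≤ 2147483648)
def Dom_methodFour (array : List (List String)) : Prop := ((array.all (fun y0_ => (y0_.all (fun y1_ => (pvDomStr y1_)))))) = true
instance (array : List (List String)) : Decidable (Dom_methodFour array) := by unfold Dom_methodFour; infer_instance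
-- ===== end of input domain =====

-- B builds all diagonals in one pass over the rows into per-diagonal buckets, instead of
-- rescanning every row once per diagonal (alternative decomposition, same total work;
-- equivalence is about the return value only — neither version mutates its argument).


-- ===== PORT A =====
-- stringify: text = ""; for y in range(len(diag)): text = text + diag[y]   (index always in range)
def stringifyA (diag : List String) : String :=
  (PySem.List.pyRange 0 (diag.length : Int) 1).foldl
    (fun text y => text ++ PySem.List.pyGetD diag y "") ""

def methodFour (array : List (List String)) : List String × (List (List (Int × Int))) :=
  let W : Int := ((array.getD 0 []).length : Int)   -- len(array[0]); Pre_ excludes array = []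
  (PySem.List.pyRange 0 (W + 1) 1).foldl
    (fun (acc : List String × List (List (Int × Int))) x =>
      if x ≠ 0 then
        (acc.1 ++ [stringifyA (((PySem.List.enumerate array 0).filter
            (fun p => -(p.1 + x) ≥ -W)).map
              (fun p => PySem.List.pyGetD p.2 (-(p.1 + x)) ""))],
         acc.2 ++ [((PySem.List.enumerate array 0).filter (fun p => -(p.1 + x) ≥ -W)).map
              (fun p => (p.1 + 1, -(p.1 + x) + W + 1))])
      else acc)
    ([], [])

-- ===== PORT B =====
def methodFour_alt (array : List (List String)) : List String × (List (List (Int × Int))) :=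
  let w : Int := ((array.getD 0 []).length : Int)
  let buckets0 : List (List (String × (Int × Int))) := (PySem.List.pyRange 0 w 1).map (fun _ => [])
  let buckets := (PySem.List.enumerate array 0).foldl
    (fun bs p =>
      (PySem.List.pyRange 1 (w - p.1 + 1) 1).foldl
        (fun bs x =>
          bs.modify (x - 1).toNat
            (fun b => b ++ [(PySem.List.pyGetD p.2 (-(p.1 + x)) "", (p.1 + 1, w + 1 - p.1 - x))]))
        bs)
    buckets0
  (buckets.map (fun b => String.join (b.map (·.1))), buckets.map (fun b => b.map (·.2)))

-- ===== PRECONDITION & SPEC =====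
-- Pre_ excludes exactly the inputs where A raises IndexError: the empty grid (array[0]) and
-- ragged grids where some scanned row is shorter than len(array[0]) (row[-(i+x)] out of range).
def Pre_methodFour (array : List (List String)) : Prop :=
  array ≠ [] ∧ ∀ i < array.length, i < (array.getD 0 []).length →
    (array.getD 0 []).length ≤ (array.getD i []).length
instance (array : List (List String)) : Decidable (Pre_methodFour array) := by
  unfold Pre_methodFour; infer_instance
def pvWitness_methodFour : List (List String) := [["a", "b", "c"], ["d", "e", "f"]]
def Spec_methodFour (array : List (List String)) (out : List String × (List (List (Int × Int)))) : Prop := out = methodFour_alt array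
instance (array : List (List String)) (out : List String × (List (List (Int × Int)))) : Decidable (Spec_methodFour array out) := by unfold Spec_methodFour; infer_instance

-- ===== CLAIM (what is proved, stated in full; the proofs are below) =====
def Claim_equal_methodFour : Prop := ∀ (array : List (List String)), Dom_methodFour array → Pre_methodFour array → Spec_methodFour array (methodFour array)

-- ===== LEMMAS AND PROOFS =====

-- the entry row p.1 contributes to diagonal x
def pvEnt (W : Int) (x : Int) (p : Int × List String) : String × (Int × Int) :=
  (PySem.List.pyGetD p.2 (-(p.1 + x)) "", (p.1 + 1, W + 1 - p.1 - x))

theorem fmg_aux {α : Type} (g : Int → α → α) (b : Int) (k : Nat) :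
    ∀ (n : Nat) (a : Int) (bs : List α), (b - a).toNat ≤ n → 1 ≤ a →
    ((PySem.List.pyRange a b 1).foldl (fun bs x => bs.modify (x - 1).toNat (g x)) bs)[k]? =
      if a ≤ (k : Int) + 1 ∧ (k : Int) + 1 < b then (bs[k]?).map (g ((k : Int) + 1)) else bs[k]? := by
  intro n
  induction n with
  | zero =>
    intro a bs hn ha
    rw [PySem.List.pyRange_one_eq_nil (by omega), List.foldl_nil, if_neg (by omega)]
  | succ n ih =>
    intro a bs hn ha
    by_cases hab : b ≤ a
    · rw [PySem.List.pyRange_one_eq_nil hab, List.foldl_nil, if_neg (by omega)]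
    · have hab' : a < b := by omega
      rw [PySem.List.pyRange_one_cons hab', List.foldl_cons,
        ih (a + 1) _ (by omega) (by omega), List.getElem?_modify]
      cases hbk : bs[k]? with
      | none => split_ifs <;> rfl
      | some v =>
        simp only [Option.map_eq_map, Option.map_some]
        split_ifs <;> try rfl
        all_goals try omega
        all_goals (rename_i h1 h2 h3; try omega)
        have ha' : a = (k : Int) + 1 := by omega
        rw [ha']

-- B's inner loop read through getElem?: bucket k gains exactly one entry iff k + 1 < b
theorem foldl_modify_getElem? {α : Type} (g : Int → α → α) (b : Int) (bs : List α) (k : Nat) :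
    ((PySem.List.pyRange 1 b 1).foldl (fun bs x => bs.modify (x - 1).toNat (g x)) bs)[k]? =
      if (k : Int) + 1 < b then (bs[k]?).map (g ((k : Int) + 1)) else bs[k]? := by
  rw [fmg_aux g b k (b - 1).toNat 1 bs (by omega) (by omega)]
  split_ifs <;> first | rfl | omega

theorem length_foldl_modify {α β : Type} (l : List β) (idx : β → Nat) (g : β → α → α)
    (bs : List α) :
    (l.foldl (fun bs x => bs.modify (idx x) (g x)) bs).length = bs.length := by
  induction l generalizing bs with
  | nil => rfl
  | cons y t ih => simp [List.foldl_cons, ih]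

-- B's outer loop, bucket by bucket
theorem buckets_spec (W : Int) (rows : List (List String)) (k : Nat) :
    ∀ (s : Int) (bs : List (List (String × (Int × Int)))), k < bs.length →
    ((PySem.List.enumerate rows s).foldl
      (fun bs p =>
        (PySem.List.pyRange 1 (W - p.1 + 1) 1).foldl
          (fun bs x =>
            bs.modify (x - 1).toNat
              (fun b => b ++ [(PySem.List.pyGetD p.2 (-(p.1 + x)) "", (p.1 + 1, W + 1 - p.1 - x))]))
          bs)
      bs)[k]? =
      some (bs.getD k [] ++
        (((PySem.List.enumerate rows s).filter (fun p => -(p.1 + ((k : Int) + 1)) ≥ -W)).map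
          (pvEnt W ((k : Int) + 1)))) := by
  induction rows with
  | nil =>
    intro s bs hk
    simp [PySem.List.enumerate_nil, List.getElem?_eq_getElem hk]
  | cons r t ih =>
    intro s bs hk
    rw [PySem.List.enumerate_cons, List.foldl_cons]
    dsimp only
    rw [ih (s + 1) _ (by rw [length_foldl_modify]; exact hk)]
    rw [List.filter_cons]
    dsimp only
    have hget := foldl_modify_getElem?
      (fun x (b : List (String × (Int × Int))) =>
        b ++ [(PySem.List.pyGetD r (-(s + x)) "", (s + 1, W + 1 - s - x))])
      (W - s + 1) bs k
    by_cases hc : -((s : Int) + ((k : Int) + 1)) ≥ -W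
    · rw [if_pos (by simpa using hc)]
      rw [if_pos (by omega), List.getElem?_eq_getElem hk] at hget
      have hfold : ((PySem.List.pyRange 1 (W - s + 1) 1).foldl
          (fun bs x => bs.modify (x - 1).toNat
            (fun b => b ++ [(PySem.List.pyGetD r (-(s + x)) "", (s + 1, W + 1 - s - x))])) bs).getD k []
          = bs[k] ++ [(PySem.List.pyGetD r (-(s + ((k:Int) + 1))) "", (s + 1, W + 1 - s - ((k:Int)+1)))] := by
        rw [List.getD_eq_getElem?_getD, hget]; rfl
      rw [hfold, List.getD_eq_getElem _ _ hk, List.map_cons]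
      simp [pvEnt, List.append_assoc]
    · rw [if_neg (by simpa using hc)]
      rw [if_neg (by omega)] at hget
      have hfold : ((PySem.List.pyRange 1 (W - s + 1) 1).foldl
          (fun bs x => bs.modify (x - 1).toNat
            (fun b => b ++ [(PySem.List.pyGetD r (-(s + x)) "", (s + 1, W + 1 - s - x))])) bs).getD k []
          = bs.getD k [] := by
        rw [List.getD_eq_getElem?_getD, hget, List.getD_eq_getElem?_getD]
      rw [hfold]

theorem outer_length (W : Int) (rows : List (List String)) :
    ∀ (s : Int) (bs : List (List (String × (Int × Int)))),
    ((PySem.List.enumerate rows s).foldl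
      (fun bs p =>
        (PySem.List.pyRange 1 (W - p.1 + 1) 1).foldl
          (fun bs x =>
            bs.modify (x - 1).toNat
              (fun b => b ++ [(PySem.List.pyGetD p.2 (-(p.1 + x)) "", (p.1 + 1, W + 1 - p.1 - x))]))
          bs)
      bs).length = bs.length := by
  induction rows with
  | nil => intro s bs; rfl
  | cons r t ih =>
    intro s bs
    rw [PySem.List.enumerate_cons, List.foldl_cons, ih]
    exact length_foldl_modify _ _ _ _

theorem stringifyA_eq_join (diag : List String) : stringifyA diag = String.join diag := by
  unfold stringifyA
  rw [PySem.List.foldl_pyRange_zero_pyGetD' diag "" (fun a b => a ++ b) ""]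
  rfl

-- A's outer loop is two appended maps once x = 0 is skipped
theorem foldl_pair_append (f : Int → String) (g : Int → List (Int × Int)) :
    ∀ (l : List Int), (∀ x ∈ l, x ≠ 0) → ∀ (acc : List String × List (List (Int × Int))),
    l.foldl (fun acc x => if x ≠ 0 then (acc.1 ++ [f x], acc.2 ++ [g x]) else acc) acc
      = (acc.1 ++ l.map f, acc.2 ++ l.map g) := by
  intro l
  induction l with
  | nil => intro _ acc; simp
  | cons y t ih =>
    intro h acc
    rw [List.foldl_cons, if_pos (h y (List.mem_cons_self)),
      ih (fun x hx => h x (List.mem_cons_of_mem _ hx))]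
    simp

-- ===== VERDICT (by name: the statement is the Claim_ definition above) =====
theorem methodFour_spec : Claim_equal_methodFour := by
  intro array _ _
  unfold Spec_methodFour
  simp only [methodFour, methodFour_alt]
  set W : Int := ((array.getD 0 []).length : Int) with hW
  have hW0 : (0:Int) ≤ W := Int.natCast_nonneg _
  have hbuckets : ((PySem.List.enumerate array 0).foldl
      (fun bs p =>
        (PySem.List.pyRange 1 (W - p.1 + 1) 1).foldl
          (fun bs x =>
            bs.modify (x - 1).toNat
              (fun b => b ++ [(PySem.List.pyGetD p.2 (-(p.1 + x)) "", (p.1 + 1, W + 1 - p.1 - x))]))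
          bs)
      ((PySem.List.pyRange 0 W 1).map (fun _ => ([] : List (String × (Int × Int)))))) =
      (List.range W.toNat).map (fun (k : Nat) =>
        ((PySem.List.enumerate array 0).filter (fun p => -(p.1 + ((k : Int) + 1)) ≥ -W)).map
          (pvEnt W ((k : Int) + 1))) := by
    have hlen0 : ((PySem.List.pyRange 0 W 1).map (fun _ => ([] : List (String × (Int × Int))))).length = W.toNat := by
      simp [PySem.List.length_pyRange_one]
    apply List.ext_getElem?
    intro k
    by_cases hk : k < W.toNat
    · rw [buckets_spec W array k 0 _ (by rw [hlen0]; exact hk)]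
      have hgd : ((PySem.List.pyRange 0 W 1).map (fun _ => ([] : List (String × (Int × Int))))).getD k [] = [] := by
        rw [List.getD_eq_getElem?_getD, List.getElem?_map]
        cases (PySem.List.pyRange 0 W 1)[k]? <;> rfl
      rw [hgd, List.getElem?_map, List.getElem?_range hk]
      rfl
    · rw [List.getElem?_eq_none (by rw [outer_length, hlen0]; omega),
        List.getElem?_eq_none (by simp; omega)]
  rw [hbuckets]
  rw [PySem.List.pyRange_one_cons (show (0:Int) < W + 1 by omega), List.foldl_cons]
  rw [if_neg (by simp)]
  rw [foldl_pair_append _ _ _ (fun x hx => by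
        have := (PySem.List.mem_pyRange_one.mp hx).1; omega) ([], [])]
  have h01 : (0:Int) + 1 = 1 := by ring
  rw [h01]
  have hrange : PySem.List.pyRange 1 (W + 1) 1 = (List.range W.toNat).map (fun (k : Nat) => 1 + (k : Int)) := by
    rw [PySem.List.pyRange_one]
    have : ((W + 1 - 1).toNat) = W.toNat := by omega
    rw [this]
  rw [hrange, List.map_map, List.map_map, List.map_map, List.map_map]
  simp only [List.nil_append]
  refine congrArg₂ Prod.mk ?_ ?_ <;> refine List.map_congr_left ?_ <;> intro k hk
  · have hx : (1:Int) + (k:Int) = (k:Int) + 1 := by ring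
    simp only [Function.comp_apply, hx]
    rw [stringifyA_eq_join, List.map_map]
    rfl
  · have hx : (1:Int) + (k:Int) = (k:Int) + 1 := by ring
    simp only [Function.comp_apply, hx, List.map_map]
    refine List.map_congr_left ?_
    intro p _
    simp only [Function.comp_apply, pvEnt]
    exact congrArg₂ Prod.mk rfl (by ring)
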